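-- pv_equiv track=rewrite | github.com/Lytna/My-all-projects | listeler.py | setfonk
-- ===== SOURCE A (Python) =====
-- def setfonk(a):
--     b = set(a)
--     s1 = 0
--     s2 = 0
--     for i in b:
--         s1 += i
--     for i in a:
--         s2 += i
--
--     return f"Tekrar eden sayı {s2-s1} "
-- ===== SOURCE B (Python) =====
-- def setfonk(a):
--     counts = {}
--     for v in a:
--         counts[v] = counts.get(v, 0) + 1
--     total = sum(v * (c - 1) for v, c in counts.items())
--     return f"Tekrar eden sayı {total} "
-- ===== Notes on version B (the rewrite author's own statement) =====
-- stated objective: idiomatic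
-- what changed: Replaces the two separate summation loops (over set(a) and over a) by a single frequency dict built in one pass, with the duplicate total computed as sum(v*(c-1)) over its items.
import Mathlib
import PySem

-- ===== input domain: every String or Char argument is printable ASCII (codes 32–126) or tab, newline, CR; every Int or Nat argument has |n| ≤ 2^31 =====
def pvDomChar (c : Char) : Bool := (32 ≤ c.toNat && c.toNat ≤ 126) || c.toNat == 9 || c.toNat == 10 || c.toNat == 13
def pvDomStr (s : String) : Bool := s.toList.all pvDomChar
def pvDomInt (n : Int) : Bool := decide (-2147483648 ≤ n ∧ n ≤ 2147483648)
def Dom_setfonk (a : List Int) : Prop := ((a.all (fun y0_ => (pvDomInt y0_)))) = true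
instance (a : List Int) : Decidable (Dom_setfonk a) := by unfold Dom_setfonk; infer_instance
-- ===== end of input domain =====

-- B replaces A's two summation loops (over set(a) and over a) with one frequency dict and
-- a single grouped pass sum(v*(c-1)); same result, idiomatic grouping (return value only).

-- ===== PORT A =====
def setfonk (a : List Int) : String :=
  let b : PySem.Set Int := PySem.Set.ofList a
  let s1 : Int := b.foldl (fun acc i => acc + i) 0
  let s2 : Int := a.foldl (fun acc i => acc + i) 0
  "Tekrar eden sayı " ++ PySem.Int.toStr (s2 - s1) ++ " "

-- ===== PORT B =====
def setfonk_alt (a : List Int) : String :=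
  let counts : PySem.Dict Int Int :=
    a.foldl (fun d v => d.insert v (d.getD v 0 + 1)) PySem.Dict.empty
  let total : Int := (counts.items.map (fun p => p.1 * (p.2 - 1))).sum
  "Tekrar eden sayı " ++ PySem.Int.toStr total ++ " "

-- ===== PRECONDITION & SPEC =====
def Spec_setfonk (a : List Int) (out : String) : Prop := out = setfonk_alt a
instance (a : List Int) (out : String) : Decidable (Spec_setfonk a out) := by unfold Spec_setfonk; infer_instance

-- ===== CLAIM (what is proved, stated in full; the proofs are below) =====
def Claim_equal_setfonk : Prop := ∀ (a : List Int), Dom_setfonk a → Spec_setfonk a (setfonk a)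

-- ===== LEMMAS AND PROOFS =====

-- summing (if v = x then v else 0) over a duplicate-free list containing x gives x
theorem pv_sum_ite_self (s : List Int) (x : Int) (hnd : s.Nodup) (hx : x ∈ s) :
    (s.map (fun v => if v = x then v else 0)).sum = x := by
  induction s with
  | nil => cases hx
  | cons y t ih =>
    rcases List.mem_cons.mp hx with h | h
    · subst h
      have hz0 : (t.map (fun v => if v = x then v else 0)).sum = 0 := by
        apply List.sum_eq_zero
        intro z hz
        rcases List.mem_map.mp hz with ⟨w, hw, rfl⟩
        have hne : w ≠ x := fun e => (List.nodup_cons.mp hnd).1 (e ▸ hw)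
        simp [hne]
      simp [hz0]
    · have hy : y ≠ x := fun e => (List.nodup_cons.mp hnd).1 (e ▸ h)
      simp [hy, ih (List.nodup_cons.mp hnd).2 h]

-- the grouped sum over the distinct elements: Σ_{v ∈ set(a)} (v·count(v) − v) = sum(a) − sum(set(a))
theorem pv_key (a : List Int) :
    ((PySem.Set.ofList a).map (fun v => v * (a.count v : Int) - v)).sum
      = a.sum - (PySem.Set.ofList a).sum := by
  induction a using List.reverseRecOn with
  | nil => simp [PySem.Set.ofList]
  | append_singleton t x ih =>
    have hset : PySem.Set.ofList (t ++ [x]) = PySem.Set.add (PySem.Set.ofList t) x := by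
      simp [PySem.Set.ofList, List.foldl_append]
    have hcnt : ∀ v : Int, (t ++ [x]).count v = t.count v + (if v = x then 1 else 0) := by
      intro v
      by_cases h : v = x
      · subst h; simp [List.count_append]
      · have hne : x ≠ v := fun e => h e.symm
        simp [List.count_append, hne, h]
    by_cases hx : x ∈ t
    · have hmem : x ∈ PySem.Set.ofList t := by
        simpa [PySem.Set.mem_ofList] using hx
      have hadd : PySem.Set.add (PySem.Set.ofList t) x = PySem.Set.ofList t := by
        simp [PySem.Set.add, PySem.Set.contains, hmem]
      have hsplit :
          ((PySem.Set.ofList t).map (fun v => v * ((t ++ [x]).count v : Int) - v)).sum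
            = ((PySem.Set.ofList t).map (fun v => v * (t.count v : Int) - v)).sum
              + ((PySem.Set.ofList t).map (fun v => if v = x then v else 0)).sum := by
        rw [← List.sum_map_add]
        apply congrArg
        apply List.map_congr_left
        intro v _
        rcases eq_or_ne v x with rfl | hne
        · simp [hcnt]
          ring
        · simp [hcnt, hne]
      rw [hset, hadd, hsplit, ih,
        pv_sum_ite_self _ x (PySem.Set.nodup_ofList t) hmem]
      simp; ring
    · have hmem : x ∉ PySem.Set.ofList t := by
        simpa [PySem.Set.mem_ofList] using hx
      have hadd : PySem.Set.add (PySem.Set.ofList t) x = PySem.Set.ofList t ++ [x] := by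
        simp [PySem.Set.add, PySem.Set.contains, hmem]
      have hcx : (t ++ [x]).count x = t.count x + 1 := by simp [hcnt]
      have htx : t.count x = 0 := List.count_eq_zero.mpr hx
      have hmap :
          (PySem.Set.ofList t).map (fun v => v * ((t ++ [x]).count v : Int) - v)
            = (PySem.Set.ofList t).map (fun v => v * (t.count v : Int) - v) := by
        apply List.map_congr_left
        intro v hv
        have hne : v ≠ x := fun e => hmem (e ▸ hv)
        simp [hcnt, hne]
      rw [hset, hadd]
      simp only [List.map_append, List.sum_append, hmap, ih, List.map_singleton,
        List.sum_singleton, hcx, htx]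
      push_cast
      ring

-- B's dict loop is collections.Counter, and its items are the distinct elements with their counts
theorem pv_total (a : List Int) :
    (((a.foldl (fun d v => d.insert v (d.getD v 0 + 1)) PySem.Dict.empty :
        PySem.Dict Int Int).items).map (fun p => p.1 * (p.2 - 1))).sum
      = a.sum - (PySem.Set.ofList a).sum := by
  rw [PySem.Dict.foldl_insert_getD_add_one_eq_counter, PySem.Dict.items_counter]
  rw [← pv_key]
  simp only [List.map_map]
  apply congrArg
  apply List.map_congr_left
  intro v _
  simp [mul_sub]

theorem pv_eq (a : List Int) : setfonk a = setfonk_alt a := by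
  simp only [setfonk, setfonk_alt]
  rw [pv_total]
  have h1 : ∀ (l : List Int), l.foldl (fun acc i => acc + i) 0 = l.sum := by
    intro l; rw [List.sum_eq_foldl]
  rw [h1, h1]

-- ===== VERDICT (by name: the statement is the Claim_ definition above) =====
theorem setfonk_spec : Claim_equal_setfonk := by
  intro a _
  exact pv_eq a
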